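-- pv_equiv track=rewrite | github.com/laurencehw/fiscal-policy-calculator | fiscal_model/ui/tabs/ask_assistant.py | _detect_typo
-- ===== SOURCE A (Python) =====
-- def _detect_typo(keys: list[str], expected: str, max_distance: int = 2) -> str | None:
--     """Find a key in ``keys`` that is within edit distance of ``expected``.
--
--     Catches common deployer mistakes like ``ANTHROPHIC_API_KEY`` (extra H)
--     or ``ANTROPIC_API_KEY`` (missing H).
--     """
--     expected_lower = expected.lower()
--     best: tuple[int, str] | None = None
--     for key in keys:
--         if key == expected:
--             continue
--         d = _edit_distance(key.lower(), expected_lower)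
--         if d <= max_distance and (best is None or d < best[0]):
--             best = (d, key)
--     return best[1] if best else None
--
-- def _edit_distance(a: str, b: str) -> int:
--     """Levenshtein distance (small implementation; inputs are short keys)."""
--     if a == b:
--         return 0
--     if not a:
--         return len(b)
--     if not b:
--         return len(a)
--     prev = list(range(len(b) + 1))
--     for i, ca in enumerate(a, start=1):
--         curr = [i] + [0] * len(b)
--         for j, cb in enumerate(b, start=1):
--             curr[j] = min(
--                 curr[j - 1] + 1,           # insertion
--                 prev[j] + 1,               # deletion
--                 prev[j - 1] + (ca != cb),  # substitution
--             )
--         prev = curr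
--     return prev[-1]
-- ===== SOURCE B (Python) =====
-- def _detect_typo(keys: list[str], expected: str, max_distance: int = 2) -> str | None:
--     """Find a key in ``keys`` within edit distance of ``expected``.
--
--     Different decomposition: score every candidate once, take the single
--     lexicographic minimum (distance, position), then apply the threshold.
--     """
--     expected_lower = expected.lower()
--     scored = [(_edit_distance(key.lower(), expected_lower), i)
--               for i, key in enumerate(keys) if key != expected]
--     if not scored:
--         return None
--     d, i = min(scored)
--     return keys[i] if d <= max_distance else None
--
--
-- def _edit_distance(a: str, b: str) -> int:
--     """Levenshtein distance via top-down recursion memoised on index pairs."""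
--     cache: dict[tuple[int, int], int] = {}
--
--     def rec(i: int, j: int) -> int:
--         if i == 0:
--             return j
--         if j == 0:
--             return i
--         hit = cache.get((i, j))
--         if hit is not None:
--             return hit
--         v = min(rec(i - 1, j) + 1,
--                 rec(i, j - 1) + 1,
--                 rec(i - 1, j - 1) + (a[i - 1] != b[j - 1]))
--         cache[(i, j)] = v
--         return v
--
--     return rec(len(a), len(b))
-- ===== Notes on version B (the rewrite author's own statement) =====
-- stated objective: alternative
-- what changed: The streaming best-so-far search loop is replaced by score-all-candidates / one lexicographic min / one threshold test, and the bottom-up rolling-array Levenshtein is replaced by a top-down recursion memoised on index pairs via a dict.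
import Mathlib
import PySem

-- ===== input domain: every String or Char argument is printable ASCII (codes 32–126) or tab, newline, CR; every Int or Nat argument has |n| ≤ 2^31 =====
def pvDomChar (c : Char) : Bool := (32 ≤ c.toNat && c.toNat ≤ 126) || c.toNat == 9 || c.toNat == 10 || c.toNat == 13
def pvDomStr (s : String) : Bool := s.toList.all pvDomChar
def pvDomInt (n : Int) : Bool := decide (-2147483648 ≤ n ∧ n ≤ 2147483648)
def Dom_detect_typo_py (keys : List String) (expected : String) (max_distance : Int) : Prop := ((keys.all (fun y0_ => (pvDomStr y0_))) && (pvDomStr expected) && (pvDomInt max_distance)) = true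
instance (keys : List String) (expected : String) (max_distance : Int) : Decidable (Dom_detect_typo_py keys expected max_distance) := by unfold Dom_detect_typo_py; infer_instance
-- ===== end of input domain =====

-- B replaces A's streaming best-tracking with "score every candidate, take one lexicographic
-- minimum, then threshold", and A's bottom-up rolling-array Levenshtein with a top-down
-- recursion memoised on index pairs (objective: alternative decomposition, same cost).

-- ===== PORT A =====
-- _edit_distance: rolling-array bottom-up DP, literal port (enumerate(·, 1) ↦ zipIdx 1;
-- curr[j] assignment ↦ List.set; prev[-1] ↦ getLastD, exact since prev is nonempty here).
def edist_py (a b : String) : Int :=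
  if a = b then 0
  else if a = "" then (b.toList.length : Int)
  else if b = "" then (a.toList.length : Int)
  else
    let la := a.toList
    let lb := b.toList
    let prev0 : List Int := (List.range (lb.length + 1)).map (fun j => (Int.ofNat j))
    let prevF : List Int := (la.zipIdx 1).foldl (fun prev ci =>
        let curr0 : List Int := ((ci.2 : Int)) :: List.replicate lb.length 0
        (lb.zipIdx 1).foldl (fun curr cj =>
            curr.set cj.2 (min (min (curr.getD (cj.2 - 1) 0 + 1) (prev.getD cj.2 0 + 1))
              (prev.getD (cj.2 - 1) 0 + (if ci.1 ≠ cj.1 then 1 else 0)))) curr0) prev0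
    prevF.getLastD 0

def detect_typo_py (keys : List String) (expected : String) (max_distance : Int) : Option String :=
  let expected_lower := PySem.Str.lower expected
  let best : Option (Int × String) := keys.foldl (fun best key =>
      if key = expected then best
      else
        let d := edist_py (PySem.Str.lower key) expected_lower
        if d ≤ max_distance then
          match best with
          | none => some (d, key)
          | some p => if d < p.1 then some (d, key) else some p
        else best) none
  match best with
  | some p => some p.2
  | none => none

-- ===== PORT B =====
-- rec(i, j) of Source B with its dict cache threaded through explicitly (cache ↦ PySem.Dict);
-- the fuel argument is only a structural totality guard (every call keeps fuel ≥ i + j).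
def edAltRec (a b : List Char) (fuel : Nat) (i j : Nat) (c : PySem.Dict (Nat × Nat) Int) :
    Int × PySem.Dict (Nat × Nat) Int :=
  match fuel with
  | 0 => (0, c)
  | fuel + 1 =>
    if i = 0 then ((j : Int), c)
    else if j = 0 then ((i : Int), c)
    else
      match c.get? (i, j) with
      | some v => (v, c)
      | none =>
        let r1 := edAltRec a b fuel (i - 1) j c
        let r2 := edAltRec a b fuel i (j - 1) r1.2
        let r3 := edAltRec a b fuel (i - 1) (j - 1) r2.2
        let v := min (min (r1.1 + 1) (r2.1 + 1))
          (r3.1 + (if a.getD (i - 1) ' ' ≠ b.getD (j - 1) ' ' then 1 else 0))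
        (v, r3.2.insert (i, j) v)

def edist_alt (a b : String) : Int :=
  (edAltRec a.toList b.toList (a.toList.length + b.toList.length) a.toList.length b.toList.length
    PySem.Dict.empty).1

def detect_typo_py_alt (keys : List String) (expected : String) (max_distance : Int) : Option String :=
  let expected_lower := PySem.Str.lower expected
  let scored : List (Int × Nat) :=
    ((keys.zipIdx).filter (fun p => p.1 ≠ expected)).map
      (fun p => (edist_alt (PySem.Str.lower p.1) expected_lower, p.2))
  match scored with
  | [] => none
  | x :: xs =>
    let m := xs.foldl (fun m p => if p.1 < m.1 ∨ (p.1 = m.1 ∧ p.2 < m.2) then p else m) x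
    if m.1 ≤ max_distance then some (keys.getD m.2 "") else none

-- ===== PRECONDITION & SPEC =====
def Spec_detect_typo_py (keys : List String) (expected : String) (max_distance : Int) (out : Option String) : Prop := out = detect_typo_py_alt keys expected max_distance
instance (keys : List String) (expected : String) (max_distance : Int) (out : Option String) : Decidable (Spec_detect_typo_py keys expected max_distance out) := by unfold Spec_detect_typo_py; infer_instance

-- ===== CLAIM (what is proved, stated in full; the proofs are below) =====
def Claim_equal_detect_typo_py : Prop := ∀ (keys : List String) (expected : String) (max_distance : Int), Dom_detect_typo_py keys expected max_distance → Spec_detect_typo_py keys expected max_distance (detect_typo_py keys expected max_distance)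

-- ===== LEMMAS AND PROOFS =====

-- Reference Levenshtein on prefix lengths.
def levD (a b : List Char) (i j : Nat) : Int :=
  if hi : i = 0 then (j : Int)
  else if hj : j = 0 then (i : Int)
  else
    min (min (levD a b (i - 1) j + 1) (levD a b i (j - 1) + 1))
      (levD a b (i - 1) (j - 1) + (if a.getD (i - 1) ' ' ≠ b.getD (j - 1) ' ' then 1 else 0))
  termination_by (i, j)
  decreasing_by
  · exact Prod.Lex.left _ _ (by omega)
  · exact Prod.Lex.right _ (by omega)
  · exact Prod.Lex.left _ _ (by omega)

theorem levD_nonneg (a b : List Char) : ∀ n i j, i + j ≤ n → 0 ≤ levD a b i j := by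
  intro n
  induction n with
  | zero =>
    intro i j h
    have hi : i = 0 := by omega
    subst hi
    rw [levD]
    simp
  | succ n ih =>
    intro i j h
    rw [levD]
    by_cases hi : i = 0
    · simp [hi]
    by_cases hj : j = 0
    · simp [hi, hj]
    simp only [hi, hj, dite_false]
    have h1 := ih (i - 1) j (by omega)
    have h2 := ih i (j - 1) (by omega)
    have h3 := ih (i - 1) (j - 1) (by omega)
    have : (0:Int) ≤ if a.getD (i - 1) ' ' ≠ b.getD (j - 1) ' ' then 1 else 0 := by
      split <;> omega
    omega

theorem levD_self (l : List Char) : ∀ i, levD l l i i = 0 := by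
  intro i
  induction i with
  | zero => rw [levD]; simp
  | succ i ih =>
    rw [levD]
    simp only [Nat.succ_ne_zero, dite_false, Nat.add_sub_cancel]
    have h1 := levD_nonneg l l (i + 1 + i) i (i + 1) (by omega)
    have h2 := levD_nonneg l l (i + 1 + i) (i + 1) i (by omega)
    simp [ih]
    omega

-- ---- memoised recursion = levD ----
def CacheOK (a b : List Char) (c : PySem.Dict (Nat × Nat) Int) : Prop :=
  ∀ p v, c.get? p = some v → v = levD a b p.1 p.2

theorem edAltRec_spec (a b : List Char) :
    ∀ fuel i j c, i + j ≤ fuel → CacheOK a b c →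
      (edAltRec a b fuel i j c).1 = levD a b i j ∧ CacheOK a b (edAltRec a b fuel i j c).2 := by
  intro fuel
  induction fuel with
  | zero =>
    intro i j c h hc
    have hi : i = 0 := by omega
    have hj : j = 0 := by omega
    subst hi; subst hj
    rw [edAltRec, levD]
    exact ⟨rfl, hc⟩
  | succ n ih =>
    intro i j c h hc
    rw [edAltRec]
    by_cases hi : i = 0
    · subst hi; rw [levD]; simp [hc]
    by_cases hj : j = 0
    · subst hj; rw [levD]; simp [hi, hc]
    simp only [hi, hj, if_false]
    cases hg : c.get? (i, j) with
    | some v =>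
      refine ⟨?_, hc⟩
      simpa using hc (i, j) v hg
    | none =>
      simp only
      obtain ⟨e1, c1ok⟩ := ih (i - 1) j c (by omega) hc
      obtain ⟨e2, c2ok⟩ := ih i (j - 1) _ (by omega) c1ok
      obtain ⟨e3, c3ok⟩ := ih (i - 1) (j - 1) _ (by omega) c2ok
      have hval : min (min ((edAltRec a b n (i - 1) j c).1 + 1)
            ((edAltRec a b n i (j - 1) (edAltRec a b n (i - 1) j c).2).1 + 1))
            ((edAltRec a b n (i - 1) (j - 1) (edAltRec a b n i (j - 1) (edAltRec a b n (i - 1) j c).2).2).1 +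
              if a.getD (i - 1) ' ' ≠ b.getD (j - 1) ' ' then 1 else 0)
          = levD a b i j := by
        rw [e1, e2, e3]
        conv_rhs => rw [levD]
        simp [hi, hj]
      refine ⟨hval, ?_⟩
      intro p v hget
      rw [PySem.Dict.get?_insert] at hget
      split at hget
      · rename_i hp
        cases hget
        subst hp
        simpa using hval
      · exact c3ok _ _ hget

theorem edist_alt_eq (a b : String) :
    edist_alt a b = levD a.toList b.toList a.toList.length b.toList.length := by
  unfold edist_alt
  exact (edAltRec_spec a.toList b.toList _ _ _ _ (le_refl _)
    (fun p v h => by simp [PySem.Dict.get?_empty] at h)).1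

-- ---- bottom-up DP = levD ----

-- row i of the DP table
def dpRow (la lb : List Char) (i : Nat) : List Int :=
  (List.range (lb.length + 1)).map (fun j => levD la lb i j)

-- partially-filled row i after t inner steps
def dpPart (la lb : List Char) (i t : Nat) : List Int :=
  (List.range (t + 1)).map (fun j => levD la lb i j) ++ List.replicate (lb.length - t) 0

theorem dpPart_full (la lb : List Char) (i : Nat) :
    dpPart la lb i lb.length = dpRow la lb i := by
  simp [dpPart, dpRow]

theorem dpPart_getD (la lb : List Char) (i t k : Nat) (hk : k ≤ t) :
    (dpPart la lb i t).getD k 0 = levD la lb i k := by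
  unfold dpPart
  rw [List.getD_append _ _ _ k (by simp; omega), PySem.List.getD_map_range _ _ _ _ (by omega)]

theorem dpRow_getD (la lb : List Char) (i k : Nat) (hk : k ≤ lb.length) :
    (dpRow la lb i).getD k 0 = levD la lb i k := by
  unfold dpRow
  rw [PySem.List.getD_map_range _ _ _ _ (by omega)]

-- one inner step sends dpPart t to dpPart (t+1)
theorem inner_step (la lb : List Char) (i t : Nat) (hi : i ≠ 0) (ht : t < lb.length)
    (ca : Char) (hca : la.getD (i - 1) ' ' = ca) (y : Char) (hy : lb.getD t ' ' = y) :
    (dpPart la lb i t).set (t + 1)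
      (min (min ((dpPart la lb i t).getD ((t + 1) - 1) 0 + 1) ((dpRow la lb (i-1)).getD (t + 1) 0 + 1))
        ((dpRow la lb (i-1)).getD ((t + 1) - 1) 0 + (if ca ≠ y then 1 else 0)))
      = dpPart la lb i (t + 1) := by
  have hv : min (min ((dpPart la lb i t).getD ((t + 1) - 1) 0 + 1) ((dpRow la lb (i-1)).getD (t + 1) 0 + 1))
        ((dpRow la lb (i-1)).getD ((t + 1) - 1) 0 + (if ca ≠ y then 1 else 0))
      = levD la lb i (t + 1) := by
    rw [show (t+1)-1 = t from rfl, dpPart_getD la lb i t t (le_refl t),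
        dpRow_getD la lb (i-1) (t+1) (by omega), dpRow_getD la lb (i-1) t (by omega)]
    conv_rhs => rw [levD]
    simp only [hi, Nat.succ_ne_zero, dite_false, Nat.add_sub_cancel]
    rw [hca, hy]
    rw [min_comm (levD la lb (i-1) (t+1) + 1) (levD la lb i t + 1)]
  rw [hv]
  unfold dpPart
  have hrep : lb.length - t = (lb.length - (t+1)) + 1 := by omega
  rw [hrep, List.replicate_succ, List.set_append]
  simp only [List.length_map, List.length_range]
  rw [if_neg (by omega), show (t+1) - (t+1) = 0 from by omega]
  simp [List.range_succ]

-- the inner fold fills the whole row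
theorem inner_fold (la lb : List Char) (i : Nat) (hi : i ≠ 0) (ca : Char)
    (hca : la.getD (i - 1) ' ' = ca) :
    ∀ (ys : List Char) (t : Nat), ys = lb.drop t → t ≤ lb.length →
    (ys.zipIdx (t + 1)).foldl (fun curr cj =>
        curr.set cj.2 (min (min (curr.getD (cj.2 - 1) 0 + 1) ((dpRow la lb (i-1)).getD cj.2 0 + 1))
          ((dpRow la lb (i-1)).getD (cj.2 - 1) 0 + (if ca ≠ cj.1 then 1 else 0))))
      (dpPart la lb i t)
      = dpRow la lb i := by
  intro ys
  induction ys with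
  | nil =>
    intro t hdrop ht
    have : lb.length ≤ t := List.drop_eq_nil_iff.mp hdrop.symm
    have : t = lb.length := by omega
    subst this
    simp [dpPart_full]
  | cons y ys ih =>
    intro t hdrop ht
    have ht' : t < lb.length := by
      by_contra hcon
      rw [List.drop_eq_nil_iff.mpr (by omega)] at hdrop
      simp at hdrop
    have hy : lb.getD t ' ' = y := by
      have h0 : lb[t]? = some y := by
        have := congrArg (fun l => l[0]?) hdrop
        simpa [List.getElem?_drop] using this.symm
      simp [List.getD, h0]
    rw [List.zipIdx_cons, List.foldl_cons]
    have hstep := inner_step la lb i t hi ht' ca hca y hy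
    simp only at hstep ⊢
    rw [hstep]
    have hdrop' : ys = lb.drop (t + 1) := by
      have := congrArg (List.drop 1) hdrop
      simpa [List.drop_drop, Nat.add_comm] using this
    have := ih (t + 1) hdrop' (by omega)
    simpa using this

-- the outer fold walks rows 0 .. |la|
theorem outer_fold (la lb : List Char) :
    ∀ (xs : List Char) (t : Nat), xs = la.drop t → t ≤ la.length →
    (xs.zipIdx (t + 1)).foldl (fun prev ci =>
        (lb.zipIdx 1).foldl (fun curr cj =>
            curr.set cj.2 (min (min (curr.getD (cj.2 - 1) 0 + 1) (prev.getD cj.2 0 + 1))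
              (prev.getD (cj.2 - 1) 0 + (if ci.1 ≠ cj.1 then 1 else 0))))
          (((ci.2 : Nat) : Int) :: List.replicate lb.length 0))
      (dpRow la lb t)
      = dpRow la lb la.length := by
  intro xs
  induction xs with
  | nil =>
    intro t hdrop ht
    have : la.length ≤ t := List.drop_eq_nil_iff.mp hdrop.symm
    have : t = la.length := by omega
    subst this
    simp
  | cons x xs ih =>
    intro t hdrop ht
    have ht' : t < la.length := by
      by_contra hcon
      rw [List.drop_eq_nil_iff.mpr (by omega)] at hdrop
      simp at hdrop
    have hx : la.getD t ' ' = x := by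
      have h0 : la[t]? = some x := by
        have := congrArg (fun l => l[0]?) hdrop
        simpa [List.getElem?_drop] using this.symm
      simp [List.getD, h0]
    rw [List.zipIdx_cons, List.foldl_cons]
    have hval : levD la lb (t+1) 0 = ((t + 1 : Nat) : Int) := by
      rw [levD]; simp
    have h0 : (((t + 1 : Nat) : Int) :: List.replicate lb.length 0) = dpPart la lb (t+1) 0 := by
      simp [dpPart, hval]
    have hfill := inner_fold la lb (t+1) (by omega) x (by simpa using hx) lb 0 rfl (by omega)
    simp only [Nat.add_sub_cancel, show (0:Nat) + 1 = 1 from rfl] at hfill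
    simp only
    rw [h0, hfill]
    have hdrop' : xs = la.drop (t + 1) := by
      have := congrArg (List.drop 1) hdrop
      simpa [List.drop_drop, Nat.add_comm] using this
    have := ih (t + 1) hdrop' (by omega)
    simpa using this

theorem dpRow_getLastD (la lb : List Char) (i : Nat) :
    (dpRow la lb i).getLastD 0 = levD la lb i lb.length := by
  unfold dpRow
  rw [List.range_succ, List.map_append]
  simp

theorem edist_py_eq (a b : String) :
    edist_py a b = levD a.toList b.toList a.toList.length b.toList.length := by
  unfold edist_py
  by_cases hab : a = b
  · simp [hab, levD_self]
  by_cases ha : a = ""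
  · have : a.toList = [] := by simp [ha]
    rw [if_neg hab, if_pos ha, this]
    rw [levD]
    simp
  by_cases hb : b = ""
  · have hbl : b.toList = [] := by simp [hb]
    rw [if_neg hab, if_neg ha, if_pos hb, hbl]
    rw [levD]
    simp
  · rw [if_neg hab, if_neg ha, if_neg hb]
    simp only
    have hl0 : ∀ j : Nat, levD a.toList b.toList 0 j = (j : Int) := by
      intro j; rw [levD]; simp
    have h0 : (List.range (b.toList.length + 1)).map (fun j => (Int.ofNat j))
        = dpRow a.toList b.toList 0 := by
      unfold dpRow
      exact List.map_congr_left (fun a _ => (hl0 a).symm)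
    rw [h0]
    have := outer_fold a.toList b.toList a.toList 0 rfl (by omega)
    rw [show (0:Nat) + 1 = 1 from rfl] at this
    rw [this, dpRow_getLastD]

-- ---- the two search loops agree ----

-- distance actually used for a key
def keyDist (expected_lower : String) (key : String) : Int :=
  levD (PySem.Str.lower key).toList expected_lower.toList
    (PySem.Str.lower key).toList.length expected_lower.toList.length

-- option-valued running lexicographic minimum (B's min(scored) unrolled)
def optMin (m : Option (Int × Nat)) (p : Int × Nat) : Option (Int × Nat) :=
  some (match m with
  | none => p
  | some q => if p.1 < q.1 ∨ (p.1 = q.1 ∧ p.2 < q.2) then p else q)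

theorem foldl_min_eq_optMin (xs : List (Int × Nat)) :
    ∀ y, some (xs.foldl (fun m p => if p.1 < m.1 ∨ (p.1 = m.1 ∧ p.2 < m.2) then p else m) y)
      = xs.foldl optMin (some y) := by
  induction xs with
  | nil => intro y; rfl
  | cons z zs ih =>
    intro y
    simp only [List.foldl_cons]
    have hz : optMin (some y) z = some (if z.1 < y.1 ∨ (z.1 = y.1 ∧ z.2 < y.2) then z else y) := rfl
    rw [hz, ← ih]

-- the invariant tying A's best to B's running minimum
def BestRel (keys : List String) (max_distance : Int) (b : Option (Int × String))
    (m : Option (Int × Nat)) (n : Nat) : Prop :=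
  match m with
  | none => b = none
  | some (d, i) => i < n ∧ i < keys.length ∧
      b = (if d ≤ max_distance then some (d, keys.getD i "") else none)

theorem loop_rel (keys : List String) (expected : String) (max_distance : Int)
    (el : String) :
    ∀ (xs : List String) (t : Nat), xs = keys.drop t → t ≤ keys.length →
    ∀ (b : Option (Int × String)) (m : Option (Int × Nat)),
      BestRel keys max_distance b m t →
      BestRel keys max_distance
        (xs.foldl (fun best key =>
          if key = expected then best
          else
            let d := keyDist el key
            if d ≤ max_distance then
              match best with
              | none => some (d, key)
              | some p => if d < p.1 then some (d, key) else some p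
            else best) b)
        ((xs.zipIdx t).foldl (fun m p =>
            if p.1 = expected then m else optMin m (keyDist el p.1, p.2)) m)
        (t + xs.length) := by
  intro xs
  induction xs with
  | nil =>
    intro t hdrop ht b m hrel
    simpa using hrel
  | cons key rest ih =>
    intro t hdrop ht b m hrel
    have ht' : t < keys.length := by
      by_contra hcon
      rw [List.drop_eq_nil_iff.mpr (by omega)] at hdrop
      simp at hdrop
    have hkey0 : keys[t]? = some key := by
      have := congrArg (fun l => l[0]?) hdrop
      simpa [List.getElem?_drop] using this.symm
    have hkey : keys.getD t "" = key := by simp [List.getD, hkey0]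
    have hdrop' : rest = keys.drop (t + 1) := by
      have := congrArg (List.drop 1) hdrop
      simpa [List.drop_drop, Nat.add_comm] using this
    rw [List.zipIdx_cons, List.foldl_cons, List.foldl_cons]
    by_cases hexp : key = expected
    · rw [if_pos hexp, if_pos hexp]
      have := ih (t+1) hdrop' (by omega) b m
        (by
          cases m with
          | none => exact hrel
          | some q =>
            obtain ⟨h1, h2, h3⟩ := hrel
            exact ⟨by omega, h2, h3⟩)
      simpa [Nat.add_comm, Nat.add_assoc, Nat.add_left_comm] using this
    · rw [if_neg hexp, if_neg hexp]
      set d := keyDist el key with hd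
      cases m with
      | none =>
        have hb : b = none := hrel
        subst hb
        have hrel' : BestRel keys max_distance
            (if d ≤ max_distance then some (d, key) else none)
            (optMin none (d, t)) (t + 1) := by
          unfold optMin BestRel
          simp only
          refine ⟨by omega, ht', ?_⟩
          by_cases hdm : d ≤ max_distance
          · simp [hdm, hkey0, List.getD]
          · simp [hdm]
        have := ih (t+1) hdrop' (by omega) _ _ hrel'
        simpa [Nat.add_comm, Nat.add_assoc, Nat.add_left_comm] using this
      | some q =>
        obtain ⟨hq1, hq2, hq3⟩ := hrel
        obtain ⟨qd, qi⟩ := q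
        simp only at hq1 hq2 hq3
        have hqi : ¬ (d = qd ∧ t < qi) := by rintro ⟨_, h⟩; omega
        by_cases hqm : qd ≤ max_distance
        · rw [if_pos hqm] at hq3
          subst hq3
          have hrel' : BestRel keys max_distance
              (if d ≤ max_distance then
                (if d < qd then some (d, key) else some (qd, keys.getD qi ""))
               else some (qd, keys.getD qi ""))
              (optMin (some (qd, qi)) (d, t)) (t + 1) := by
            unfold optMin BestRel
            simp only
            by_cases hlt : d < qd
            · rw [if_pos (Or.inl hlt)]
              refine ⟨by omega, ht', ?_⟩
              have hdm : d ≤ max_distance := by omega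
              simp [hdm, hlt, hkey0, List.getD]
            · rw [if_neg (by simp [hlt, hqi])]
              refine ⟨by omega, hq2, ?_⟩
              by_cases hdm : d ≤ max_distance
              · simp [hdm, hlt, hqm]
              · simp [hdm, hqm]
          have := ih (t+1) hdrop' (by omega) _ _ hrel'
          simpa [Nat.add_comm, Nat.add_assoc, Nat.add_left_comm] using this
        · rw [if_neg hqm] at hq3
          subst hq3
          have hrel' : BestRel keys max_distance
              (if d ≤ max_distance then some (d, key) else none)
              (optMin (some (qd, qi)) (d, t)) (t + 1) := by
            unfold optMin BestRel
            simp only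
            by_cases hlt : d < qd
            · rw [if_pos (Or.inl hlt)]
              refine ⟨by omega, ht', ?_⟩
              by_cases hdm : d ≤ max_distance
              · simp [hdm, hkey0, List.getD]
              · simp [hdm]
            · rw [if_neg (by simp [hlt, hqi])]
              refine ⟨by omega, hq2, ?_⟩
              have hdm : ¬ d ≤ max_distance := by omega
              simp [hdm, hqm]
          have := ih (t+1) hdrop' (by omega) _ _ hrel'
          simpa [Nat.add_comm, Nat.add_assoc, Nat.add_left_comm] using this

-- folding B's step over the filtered-and-mapped score list = folding the combined step over the raw list
theorem scored_fold (expected el : String) (l : List (String × Nat)) (m0 : Option (Int × Nat)) :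
    ((l.filter (fun p => p.1 ≠ expected)).map (fun p => (keyDist el p.1, p.2))).foldl optMin m0
    = l.foldl (fun m p => if p.1 = expected then m else optMin m (keyDist el p.1, p.2)) m0 := by
  rw [List.foldl_map, List.foldl_filter]
  have : (fun (m : Option (Int × Nat)) (p : String × Nat) =>
      if (decide (p.1 ≠ expected)) = true then optMin m (keyDist el p.1, p.2) else m)
      = (fun m p => if p.1 = expected then m else optMin m (keyDist el p.1, p.2)) := by
    funext m p
    by_cases h : p.1 = expected <;> simp [h]
  rw [this]

-- ===== VERDICT (by name: the statement is the Claim_ definition above) =====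
theorem detect_typo_py_spec : Claim_equal_detect_typo_py := by
  intro keys expected max_distance _
  unfold Spec_detect_typo_py detect_typo_py detect_typo_py_alt
  simp only
  have hedA : ∀ key : String, edist_py (PySem.Str.lower key) (PySem.Str.lower expected)
      = keyDist (PySem.Str.lower expected) key := by
    intro key
    rw [edist_py_eq]
    rfl
  have hedB : ∀ key : String, edist_alt (PySem.Str.lower key) (PySem.Str.lower expected)
      = keyDist (PySem.Str.lower expected) key := by
    intro key
    rw [edist_alt_eq]
    rfl
  simp only [hedA, hedB]
  have hrel := loop_rel keys expected max_distance (PySem.Str.lower expected) keys 0 rfl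
    (by omega) none none rfl
  rw [← scored_fold] at hrel
  cases hs : (((keys.zipIdx).filter (fun p => p.1 ≠ expected)).map
      (fun p => (keyDist (PySem.Str.lower expected) p.1, p.2))) with
  | nil =>
    rw [hs] at hrel
    simp only [List.foldl_nil] at hrel
    have hb : (keys.foldl (fun best key =>
        if key = expected then best
        else
          let d := keyDist (PySem.Str.lower expected) key
          if d ≤ max_distance then
            match best with
            | none => some (d, key)
            | some p => if d < p.1 then some (d, key) else some p
          else best) none) = none := hrel
    rw [hb]
  | cons x xs =>
    rw [hs] at hrel
    simp only [List.foldl_cons] at hrel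
    have hopt : optMin none x = some x := rfl
    rw [hopt, ← foldl_min_eq_optMin] at hrel
    obtain ⟨h1, h2, h3⟩ := hrel
    rw [h3]
    by_cases hdm : (xs.foldl (fun m p => if p.1 < m.1 ∨ (p.1 = m.1 ∧ p.2 < m.2) then p else m) x).1
        ≤ max_distance
    · simp [hdm]
    · simp [hdm]
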